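-- pv_equiv track=rewrite | github.com/sidduGIT/list_examples | list_examples.py | remove_index
-- ===== SOURCE A (Python) =====
-- def remove_index(lst1,n):
--     index=0
--     nlst=[]
--     for item in lst1:
--         if index==n:
--             pass
--         else:
--             nlst.append(item)
--         index += 1
--     return nlst
-- ===== SOURCE B (Python) =====
-- def remove_index(lst1, n):
--     if 0 <= n < len(lst1):
--         return lst1[:n] + lst1[n+1:]
--     return lst1[:]
-- ===== Notes on version B (the rewrite author's own statement) =====
-- stated objective: simpler
-- what changed: Replaces the counter loop with a skip branch by a bounds test and two slices lst1[:n] + lst1[n+1:] (full copy when n is not a valid forward index).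
import Mathlib
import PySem

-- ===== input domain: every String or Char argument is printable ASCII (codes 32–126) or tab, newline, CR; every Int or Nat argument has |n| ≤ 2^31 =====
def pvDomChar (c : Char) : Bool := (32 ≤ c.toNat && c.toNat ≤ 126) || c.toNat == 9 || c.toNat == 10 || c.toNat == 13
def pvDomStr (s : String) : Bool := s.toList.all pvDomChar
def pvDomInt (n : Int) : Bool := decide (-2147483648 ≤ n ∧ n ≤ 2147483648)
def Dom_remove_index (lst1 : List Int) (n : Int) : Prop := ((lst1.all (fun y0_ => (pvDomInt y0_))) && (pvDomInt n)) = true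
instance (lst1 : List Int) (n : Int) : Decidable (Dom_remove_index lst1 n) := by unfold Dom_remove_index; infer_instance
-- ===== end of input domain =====

-- B replaces A's counter loop with a bounds test and two slices (same cost; objective: simpler).
-- ===== PORT A =====
-- Literal port of A: fold over the list carrying (index, nlst); skip the item when index == n.
def remove_index (lst1 : List Int) (n : Int) : List Int :=
  (lst1.foldl (fun (s : Int × List Int) item =>
      (s.1 + 1, if s.1 == n then s.2 else s.2 ++ [item])) (0, [])).2

-- ===== PORT B =====
-- Port of B: bounds test, then two slices lst1[:n] ++ lst1[n+1:], else the copy lst1[:].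
def remove_index_alt (lst1 : List Int) (n : Int) : List Int :=
  if 0 ≤ n ∧ n < lst1.length then
    PySem.List.slice lst1 none (some n) ++ PySem.List.slice lst1 (some (n + 1)) none
  else
    PySem.List.slice lst1 none none

-- ===== PRECONDITION & SPEC =====
def Spec_remove_index (lst1 : List Int) (n : Int) (out : List Int) : Prop := out = remove_index_alt lst1 n
instance (lst1 : List Int) (n : Int) (out : List Int) : Decidable (Spec_remove_index lst1 n out) := by unfold Spec_remove_index; infer_instance

-- ===== CLAIM (what is proved, stated in full; the proofs are below) =====
def Claim_equal_remove_index : Prop := ∀ (lst1 : List Int) (n : Int), Dom_remove_index lst1 n → Spec_remove_index lst1 n (remove_index lst1 n)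

-- ===== LEMMAS AND PROOFS =====

-- ===== VERDICT (by name: the statement is the Claim_ definition above) =====
-- A's loop, characterised relative to a running start index i.
theorem removeA_go (n : Int) (lst1 : List Int) : ∀ (i : Int) (acc : List Int),
    (lst1.foldl (fun (s : Int × List Int) item =>
        (s.1 + 1, if s.1 == n then s.2 else s.2 ++ [item])) (i, acc)).2
      = acc ++ (if 0 ≤ n - i ∧ n - i < lst1.length then
          lst1.take (n - i).toNat ++ lst1.drop ((n - i).toNat + 1) else lst1) := by
  induction lst1 with
  | nil => intro i acc; simp
  | cons x xs ih =>
    intro i acc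
    simp only [List.foldl_cons]
    rw [ih (i + 1)]
    by_cases hin : i = n
    · have hL : ¬ (0 ≤ n - (i + 1) ∧ n - (i + 1) < (xs.length : Int)) := by omega
      have hR : 0 ≤ n - i ∧ n - i < ((x :: xs).length : Int) := by
        simp; omega
      have h0 : (n - i).toNat = 0 := by omega
      rw [if_pos (by simp [hin] : ((i == n) = true)), if_neg hL, if_pos hR, h0]
      simp
    · rw [if_neg (by simp [hin] : ¬ ((i == n) = true))]
      by_cases hr : 0 ≤ n - i ∧ n - i < ((x :: xs).length : Int)
      · have hr' : 0 ≤ n - (i + 1) ∧ n - (i + 1) < (xs.length : Int) := by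
          simp at hr; omega
        have ht : (n - i).toNat = (n - (i + 1)).toNat + 1 := by omega
        rw [if_pos hr', if_pos hr, ht]
        simp
      · have hr' : ¬ (0 ≤ n - (i + 1) ∧ n - (i + 1) < (xs.length : Int)) := by
          simp at hr; omega
        rw [if_neg hr', if_neg hr]
        simp

theorem remove_index_spec : Claim_equal_remove_index := by
  intro lst1 n _
  unfold Spec_remove_index remove_index remove_index_alt
  rw [removeA_go]
  by_cases h : 0 ≤ n ∧ n < (lst1.length : Int)
  · have hn : 0 ≤ n - 0 ∧ n - 0 < (lst1.length : Int) := by omega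
    rw [if_pos hn, if_pos h, PySem.List.slice_to _ h.1,
        PySem.List.slice_from _ (by omega : (0:Int) ≤ n + 1)]
    have : (n + 1).toNat = (n - 0).toNat + 1 := by omega
    simp [this]
  · have hn : ¬ (0 ≤ n - 0 ∧ n - 0 < (lst1.length : Int)) := by omega
    rw [if_neg hn, if_neg h, PySem.List.slice_none_none]
    simp
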